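-- pv_equiv track=rewrite | github.com/qiboteam/qibo | src/qibo/tomography_RGD/measurements.py | zfill
-- ===== SOURCE A (Python) =====
-- def zfill(count_dict):
--     """ to pad 0 in the front of the keys of the count_dict such that
--         their lengths are equal to the qubit number.
--
--     Args:
--         count_dict (dict): counts of each possible binary output string (e.g. '000...00', '000...01', etc.)
--         For example, count_dict = {'101': 617, '000': 581, '111': 574, '010': 628}
--
--     Returns:
--         dict: (result) same as count_dict but with the keys being filled with 0 in
--             the front to let their lengths be equal to the qubit number.
--     """
--     n = len(list(count_dict.keys())[0])
--     d = 2 ** n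
--     result = {}
--     for idx in range(d):
--         key = bin(idx)[2:]
--         key = key.zfill(n)
--         result[key] = count_dict.get(key, 0)
--     return result
-- ===== SOURCE B (Python) =====
-- def zfill(count_dict):
--     n = len(next(iter(count_dict)))
--     keys = ['']
--     for _ in range(n):
--         keys = [k + b for k in keys for b in '01']
--     return {k: count_dict.get(k, 0) for k in keys}
-- ===== Notes on version B (the rewrite author's own statement) =====
-- stated objective: alternative
-- what changed: B generates all 2^n binary keys by n Cartesian-product extension steps of a key list instead of converting each index 0..2^n-1 with bin()/zfill, and fills the dict in one comprehension.
-- intended difference: When the first key is the empty string (n = 0), A returns {'0': count_dict.get('0', 0)} — a wrong-length key that drops the data — while B returns the intended single zero-length key {'': count_dict.get('', 0)}. — e.g. on zfill([("", 5)]): A returns [("0", 0)], B returns [("", 5)]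
import Mathlib
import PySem

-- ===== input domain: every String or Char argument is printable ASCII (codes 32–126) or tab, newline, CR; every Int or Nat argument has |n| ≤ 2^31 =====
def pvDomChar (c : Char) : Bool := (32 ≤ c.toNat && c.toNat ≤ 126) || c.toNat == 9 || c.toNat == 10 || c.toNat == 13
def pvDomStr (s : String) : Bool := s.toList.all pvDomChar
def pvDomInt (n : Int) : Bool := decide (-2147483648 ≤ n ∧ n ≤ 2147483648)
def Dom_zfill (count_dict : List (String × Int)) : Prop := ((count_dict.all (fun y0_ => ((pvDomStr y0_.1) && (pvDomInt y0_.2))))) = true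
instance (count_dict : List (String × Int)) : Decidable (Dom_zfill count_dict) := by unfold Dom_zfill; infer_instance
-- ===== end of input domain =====

-- B replaces A's per-index bin()/zfill conversion by generating all length-n binary keys
-- through n Cartesian-product extension steps (objective: alternative decomposition, same cost).

-- ===== PORT A =====
-- bin(idx)[2:] for idx ≥ 1 (empty for 0): binary digits, most significant first
def binCharsAux : Nat → List Char
  | 0 => []
  | n+1 => binCharsAux ((n+1)/2) ++ [if (n+1) % 2 = 1 then '1' else '0']
decreasing_by exact Nat.div_lt_self (Nat.succ_pos n) (by norm_num)

-- bin(idx)[2:]  (bin(0) = '0b0', so '0')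
def binChars (i : Nat) : List Char := if i = 0 then ['0'] else binCharsAux i

def zfill (count_dict : List (String × Int)) : List (String × Int) :=
  match PySem.List.pyGet? (PySem.Dict.keys (PySem.Dict.mk count_dict)) 0 with
  | none => []  -- list(count_dict.keys())[0] raises IndexError: outside Pre_
  | some k =>
    let n := k.toList.length
    let d := 2 ^ n
    ((List.range d).foldl (fun result idx =>
        let key := binChars idx
        let key := PySem.Chars.zfill key (n : Int)
        PySem.Dict.insert result (String.ofList key)
          (PySem.Dict.getD (PySem.Dict.mk count_dict) (String.ofList key) 0))
      PySem.Dict.empty).items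

-- ===== PORT B =====
def zfill_alt (count_dict : List (String × Int)) : List (String × Int) :=
  match count_dict.head? with
  | none => []  -- next(iter(count_dict)) raises StopIteration: outside Pre_
  | some p =>
    let n := p.1.toList.length
    let keys := (List.range n).foldl
      (fun ks _ => ks.flatMap (fun k => [k ++ ['0'], k ++ ['1']])) [([] : List Char)]
    -- the generated keys are pairwise distinct, so the dict comprehension is this list of pairs
    keys.map (fun k => (String.ofList k, PySem.Dict.getD (PySem.Dict.mk count_dict) (String.ofList k) 0))

-- ===== PRECONDITION & SPEC =====
-- Pre_ excludes only the empty dict, on which A raises IndexError (and B StopIteration).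
def Pre_zfill (count_dict : List (String × Int)) : Prop := count_dict ≠ []
instance (count_dict : List (String × Int)) : Decidable (Pre_zfill count_dict) := by unfold Pre_zfill; infer_instance
def pvWitness_zfill : (List (String × Int)) := [("1", 3), ("0", 2)]

-- When the first key is the empty string (n = 0 qubits), A returns {'0': count_dict.get('0', 0)}
-- — a key of the wrong length that drops the data — while B returns the intended single
-- length-0 key {'': count_dict.get('', 0)}.
def D_zfill (count_dict : List (String × Int)) : Prop := (count_dict.head?.map (·.1)) = some ""
instance (count_dict : List (String × Int)) : Decidable (D_zfill count_dict) := by unfold D_zfill; infer_instance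

def Spec_zfill (count_dict : List (String × Int)) (out : List (String × Int)) : Prop := ¬ D_zfill count_dict → out = zfill_alt count_dict
instance (count_dict : List (String × Int)) (out : List (String × Int)) : Decidable (Spec_zfill count_dict out) := by unfold Spec_zfill; infer_instance

def pvDiffWitness_zfill : (List (String × Int)) := [("", 5)]
def pvDiffWitnessOut_zfill : (List (String × Int)) × (List (String × Int)) := ([("0", 0)], [("", 5)])

-- ===== CLAIM (what is proved, stated in full; the proofs are below) =====
def Claim_unchanged_zfill : Prop := ∀ (count_dict : List (String × Int)), Dom_zfill count_dict → Pre_zfill count_dict → Spec_zfill count_dict (zfill count_dict)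
def Claim_changed_zfill : Prop := Dom_zfill (pvDiffWitness_zfill) ∧ Pre_zfill (pvDiffWitness_zfill) ∧ D_zfill (pvDiffWitness_zfill) ∧ zfill (pvDiffWitness_zfill) = pvDiffWitnessOut_zfill.1 ∧ zfill_alt (pvDiffWitness_zfill) = pvDiffWitnessOut_zfill.2 ∧ pvDiffWitnessOut_zfill.1 ≠ pvDiffWitnessOut_zfill.2
def Claim_exact_zfill : Prop := ∀ (count_dict : List (String × Int)), Dom_zfill count_dict → Pre_zfill count_dict → D_zfill count_dict → zfill count_dict ≠ zfill_alt count_dict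

-- ===== LEMMAS AND PROOFS =====

-- the n-bit binary representation of i, most significant bit first
def bits : Nat → Nat → List Char
  | 0, _ => []
  | n+1, i => bits n (i/2) ++ [if i % 2 = 1 then '1' else '0']

theorem bits_zero (n : Nat) : bits n 0 = List.replicate n '0' := by
  induction n with
  | zero => rfl
  | succ n ih => simp [bits, ih, List.replicate_succ' (n := n)]

theorem bits_length (n : Nat) : ∀ k, (bits n k).length = n := by
  induction n with
  | zero => intro k; rfl
  | succ n ih => intro k; simp [bits, ih]

theorem bits_injOn (n : Nat) : ∀ i j, i < 2^n → j < 2^n → bits n i = bits n j → i = j := by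
  induction n with
  | zero => intro i j hi hj _; omega
  | succ n ih =>
    intro i j hi hj h
    simp only [bits] at h
    have h2 := List.append_inj h (by simp [bits_length])
    obtain ⟨h1, htail⟩ := h2
    have hq : i / 2 = j / 2 := ih _ _ (by omega) (by omega) h1
    have hr : i % 2 = j % 2 := by
      by_contra hne
      rcases Nat.mod_two_eq_zero_or_one i with h0 | h0 <;>
        rcases Nat.mod_two_eq_zero_or_one j with h0' | h0' <;>
        simp [h0, h0'] at htail hne
    omega

theorem pvRangeTwoMul (m : Nat) :
    List.range (2 * m) = (List.range m).flatMap (fun i => [2*i, 2*i+1]) := by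
  induction m with
  | zero => rfl
  | succ m ih =>
    have h : 2 * (m + 1) = (2*m) + 1 + 1 := by ring
    rw [h, List.range_succ, List.range_succ, List.range_succ, ih]
    simp

theorem genKeys_eq (n : Nat) :
    (List.range n).foldl (fun ks _ => ks.flatMap (fun k => [k ++ ['0'], k ++ ['1']])) [([] : List Char)]
      = (List.range (2^n)).map (fun i => bits n i) := by
  induction n with
  | zero => rfl
  | succ n ih =>
    rw [List.range_succ, List.foldl_append, ih]
    have h2 : 2^(n+1) = 2 * 2^n := by ring
    rw [h2, pvRangeTwoMul]
    simp only [List.foldl_cons, List.foldl_nil, List.flatMap_map, List.map_flatMap]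
    refine List.flatMap_congr ?_
    intro i _
    have e0 : (2*i) / 2 = i := by omega
    have e1 : (2*i+1) / 2 = i := by omega
    have m0 : (2*i) % 2 = 0 := by omega
    have m1 : (2*i+1) % 2 = 1 := by omega
    simp [bits, e0, e1, m0, m1]

theorem binCharsAux_ne_nil (i : Nat) (hi : 1 ≤ i) : binCharsAux i ≠ [] := by
  match i, hi with
  | n+1, _ => rw [binCharsAux]; simp

theorem binCharsAux_head (i : Nat) (hi : 1 ≤ i) :
    (binCharsAux i).head? = some '0' ∨ (binCharsAux i).head? = some '1' := by
  induction i using Nat.strong_induction_on with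
  | _ i ih =>
    match i, hi with
    | m+1, _ =>
      rw [binCharsAux]
      by_cases hq : (m+1)/2 = 0
      · rw [hq]
        by_cases hm : (m+1) % 2 = 1 <;> simp [binCharsAux, hm]
      · have h := ih ((m+1)/2) (by omega) (by omega)
        rcases h with h | h <;> simp [List.head?_append, h]

theorem bits_eq_pad (n i : Nat) (hi1 : 1 ≤ i) (hi : i < 2^n) :
    bits n i = List.replicate (n - (binCharsAux i).length) '0' ++ binCharsAux i := by
  induction n generalizing i with
  | zero => omega
  | succ n ih =>
    match i, hi1 with
    | m+1, _ =>
      rw [bits, binCharsAux]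
      by_cases hq : (m+1)/2 = 0
      · have hm : m = 0 := by omega
        subst hm
        simp [hq, binCharsAux, bits_zero]
      · have hlt : (m+1)/2 < 2^n := by
          have := Nat.div_lt_iff_lt_mul (x := m+1) (k := 2^n) (y := 2) (by norm_num)
          omega
        rw [ih _ (by omega) hlt]
        have hlen : (binCharsAux ((m+1)/2) ++ [if (m+1) % 2 = 1 then '1' else '0']).length
            = (binCharsAux ((m+1)/2)).length + 1 := by simp
        rw [hlen]
        have h3 : n + 1 - ((binCharsAux ((m+1)/2)).length + 1) = n - (binCharsAux ((m+1)/2)).length := by omega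
        rw [h3, List.append_assoc]

theorem binChars_head (i : Nat) : binChars i ≠ [] ∧ ((binChars i).head? = some '0' ∨ (binChars i).head? = some '1') := by
  unfold binChars
  by_cases h : i = 0
  · simp [h]
  · refine ⟨by simp [h]; exact binCharsAux_ne_nil i (by omega), ?_⟩
    simp only [h, if_false]
    exact binCharsAux_head i (by omega)

theorem zfill_binChars (n i : Nat) (hn : 1 ≤ n) (hi : i < 2^n) :
    PySem.Chars.zfill (binChars i) (n : Int) = bits n i := by
  obtain ⟨hne, hhead⟩ := binChars_head i
  have hpad : PySem.Chars.zfill (binChars i) (n : Int)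
      = List.replicate (n - (binChars i).length) '0' ++ binChars i := by
    unfold PySem.Chars.zfill
    match hbc : binChars i with
    | [] => exact absurd hbc hne
    | c :: rest =>
      have hc : c = '0' ∨ c = '1' := by
        rw [hbc] at hhead; simpa using hhead
      have hcs : ¬ (c = '+' ∨ c = '-') := by rcases hc with h | h <;> simp [h]
      simp only [hcs, if_false]
      split
      · next hle =>
        have h0 : n - (rest.length + 1) = 0 := by
          simp at hle; omega
        simp [h0]
      · next hgt =>
        have h1 : ((n : Int)).toNat = n := by simp
        rw [h1]
  rw [hpad]
  by_cases hi0 : i = 0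
  · subst hi0
    rw [bits_zero, show binChars 0 = ['0'] from rfl]
    simp only [List.length_cons, List.length_nil]
    rw [show (List.replicate n '0' : List Char) = List.replicate ((n-1)+1) '0' by congr 1; omega,
      List.replicate_succ']
  · rw [show binChars i = binCharsAux i from by simp [binChars, hi0]]
    exact (bits_eq_pad n i (by omega) hi).symm

theorem zfill_eq_map (p : String × Int) (rest : List (String × Int))
    (hn : 1 ≤ p.1.toList.length) :
    zfill (p :: rest) = (List.range (2 ^ p.1.toList.length)).map
      (fun i => (String.ofList (bits p.1.toList.length i),
        PySem.Dict.getD (PySem.Dict.mk (p :: rest)) (String.ofList (bits p.1.toList.length i)) 0)) := by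
  unfold zfill
  simp only [PySem.Dict.keys_mk, List.map_cons, PySem.List.pyGet?_zero_cons]
  have hkey : ∀ i ∈ List.range (2^p.1.toList.length),
      PySem.Chars.zfill (binChars i) ((p.1.toList.length : Nat) : Int) = bits p.1.toList.length i := by
    intro i hi
    exact zfill_binChars _ i hn (List.mem_range.mp hi)
  rw [PySem.List.foldl_congr_mem (List.range (2 ^ p.1.toList.length)) _
      (fun result idx => PySem.Dict.insert result (String.ofList (bits p.1.toList.length idx))
        (PySem.Dict.getD (PySem.Dict.mk (p :: rest)) (String.ofList (bits p.1.toList.length idx)) 0))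
      PySem.Dict.empty (by intro acc x hx; simp only [hkey x hx])]
  rw [PySem.Dict.items_foldl_insert_fresh (List.range (2 ^ p.1.toList.length))
      (fun idx => String.ofList (bits p.1.toList.length idx))
      (fun idx => PySem.Dict.getD (PySem.Dict.mk (p :: rest)) (String.ofList (bits p.1.toList.length idx)) 0)
      PySem.Dict.empty
      (by intro a _; rfl)
      (by
        rw [List.nodup_map_iff_inj_on List.nodup_range]
        intro i hi j hj h
        exact bits_injOn _ i j (List.mem_range.mp hi) (List.mem_range.mp hj)
          (by have h2 := congrArg String.toList h; simpa [String.toList_ofList] using h2))]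
  simp [PySem.Dict.empty]

-- ===== VERDICT =====
theorem zfill_spec : Claim_unchanged_zfill := by
  intro count_dict _ hpre
  unfold Spec_zfill
  intro hnd
  cases count_dict with
  | nil => exact absurd rfl hpre
  | cons p rest =>
    have hn : 1 ≤ p.1.toList.length := by
      unfold D_zfill at hnd
      simp only [List.head?_cons, Option.map_some, Option.some_inj] at hnd
      cases hl : p.1.toList with
      | nil =>
        exfalso
        apply hnd
        have h2 : p.1 = String.ofList p.1.toList := String.ofList_toList.symm
        rw [h2, hl]
      | cons a l => simp
    rw [zfill_eq_map p rest hn]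
    unfold zfill_alt
    simp only [List.head?_cons]
    rw [genKeys_eq]
    simp [List.map_map, Function.comp]

theorem zfill_changed : Claim_changed_zfill := by
  unfold Claim_changed_zfill; decide

theorem zfill_tight : Claim_exact_zfill := by
  intro count_dict _ hpre hd
  cases count_dict with
  | nil => exact absurd rfl hpre
  | cons p rest =>
    unfold D_zfill at hd
    simp only [List.head?_cons, Option.map_some, Option.some_inj] at hd
    have hlen : p.1.toList.length = 0 := by rw [hd]; rfl
    intro h
    unfold zfill zfill_alt at h
    simp only [PySem.Dict.keys_mk, List.map_cons, PySem.List.pyGet?_zero_cons,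
      List.head?_cons, hlen] at h
    have h1 := congrArg (fun l => l.head?.map Prod.fst) h
    simp [PySem.Dict.empty, PySem.Dict.insert, PySem.Dict.contains,
      PySem.Chars.zfill, binChars] at h1
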